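-- pv_equiv track=rewrite | github.com/ahyangyi/openttd-newgrfs | station/lib/switch.py | find_default_element
-- ===== SOURCE A (Python) =====
-- def find_default_element(d):
--     reverse_lookup = {}
--     value_count = {}
--
--     prev_k = None
--     for k, v in sorted(d.items()):
--         if isinstance(v, int):
--             key = v
--         else:
--             key = id(v)
--             reverse_lookup[key] = v
--
--         if prev_k is None or k != prev_k + 1 or v != prev_v:
--             value_count[key] = value_count.get(key, 0) + 1
--
--         prev_k = k
--         prev_v = v
--
--     max_count = max(value_count.values())
--     return [reverse_lookup.get(v, v) for v, c in value_count.items() if c == max_count][0]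
-- ===== SOURCE B (Python) =====
-- def find_default_element(d):
--     # Hash-based, no sort: a run (in sorted-key order) starts at (k, v) exactly
--     # when d.get(k - 1) != v.  Count run starts per value, then take the start
--     # with the smallest key among values attaining the maximal start count.
--     starts = [(k, v) for k, v in d.items() if d.get(k - 1) != v]
--     cnt = {}
--     for _, v in starts:
--         cnt[v] = cnt.get(v, 0) + 1
--     m = max(cnt.values())
--     return min(p for p in starts if cnt[p[1]] == m)[1]
-- ===== Notes on version B (the rewrite author's own statement) =====
-- stated objective: alternative
-- what changed: B drops A's sort-then-scan with prev-key state: a run of consecutive keys starts at (k,v) exactly when d.get(k-1) != v, so B finds run starts by dict lookups in one unsorted pass, counts starts per value, and returns the minimal-key start among values with the maximal count.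
import Mathlib
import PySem

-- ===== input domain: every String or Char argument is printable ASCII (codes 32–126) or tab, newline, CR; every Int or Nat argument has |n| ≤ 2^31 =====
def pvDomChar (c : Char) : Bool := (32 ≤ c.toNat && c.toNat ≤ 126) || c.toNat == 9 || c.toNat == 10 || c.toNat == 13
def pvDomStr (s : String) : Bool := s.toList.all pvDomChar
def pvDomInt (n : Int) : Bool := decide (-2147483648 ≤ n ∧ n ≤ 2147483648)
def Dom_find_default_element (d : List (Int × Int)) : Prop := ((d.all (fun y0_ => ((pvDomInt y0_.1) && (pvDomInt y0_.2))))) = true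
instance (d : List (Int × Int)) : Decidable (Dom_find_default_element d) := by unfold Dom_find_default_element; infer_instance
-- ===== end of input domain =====

-- B replaces A's sort + prev-key scan by hash lookups: a run starts at (k, v) iff d.get(k-1) != v,
-- so B counts run starts per value in one pass and picks the minimal-key start among max-count values.


-- ===== PORT A =====
-- A's loop body (state: (previous (k, v) or none, value_count)).  The dict's values are ints,
-- so Python's `isinstance(v, int)` branch always takes key = v, reverse_lookup stays empty and
-- reverse_lookup.get(v, v) = v.
def pvAstep (st : Option (Int × Int) × PySem.Dict Int Int) (kv : Int × Int) :
    Option (Int × Int) × PySem.Dict Int Int :=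
  let doCount : Bool :=
    match st.1 with
    | none => true
    | some pv => decide (kv.1 ≠ pv.1 + 1) || decide (kv.2 ≠ pv.2)
  (some kv, if doCount then st.2.insert kv.2 (st.2.getD kv.2 0 + 1) else st.2)

def find_default_element (d : List (Int × Int)) : Int :=
  -- the Python function receives a dict: build it from the association list (last value wins)
  let dd := PySem.Dict.ofList d
  -- sorted(d.items()) sorts pairs; the keys are distinct, so this equals the sort by key
  let vc := ((PySem.List.sorted dd.items (fun p => p.1)).foldl pvAstep (none, PySem.Dict.empty)).2
  -- max(...) raises ValueError on the empty dict: excluded by Pre_; [0] is then always valid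
  let max_count := (PySem.List.max? vc.values (fun c => c)).getD 0
  (((vc.items.filter (fun p => p.2 == max_count)).map (fun p => p.1)).head?).getD 0

-- ===== PORT B =====
def find_default_element_alt (d : List (Int × Int)) : Int :=
  let dd := PySem.Dict.ofList d
  -- d.get(k-1) != v: a missing key gives None, which never equals the int v
  let starts := dd.items.filter (fun p => !(dd.get? (p.1 - 1) == some p.2))
  let cnt := starts.foldl (fun c p => c.insert p.2 (c.getD p.2 0 + 1)) (PySem.Dict.empty : PySem.Dict Int Int)
  -- max(...) raises ValueError on the empty dict: excluded by Pre_
  let m := (PySem.List.max? cnt.values (fun c => c)).getD 0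
  -- cnt[p[1]]: every start's value is a key of cnt, so getD's default is never used;
  -- min(...) over pairs is the lexicographic minimum, never empty since m is attained
  ((PySem.List.min2? (starts.filter (fun p => cnt.getD p.2 0 == m)) (fun p => p.1) (fun p => p.2)).getD
    (0, 0)).2

-- ===== PRECONDITION & SPEC =====
-- Pre_ excludes only the empty dict, on which A raises ValueError (max() of an empty sequence).
def Pre_find_default_element (d : List (Int × Int)) : Prop := d ≠ []
instance (d : List (Int × Int)) : Decidable (Pre_find_default_element d) := by unfold Pre_find_default_element; infer_instance
def pvWitness_find_default_element : (List (Int × Int)) := [(3, 7), (4, 7), (9, 5)]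
def Spec_find_default_element (d : List (Int × Int)) (out : Int) : Prop := out = find_default_element_alt d
instance (d : List (Int × Int)) (out : Int) : Decidable (Spec_find_default_element d out) := by unfold Spec_find_default_element; infer_instance

-- ===== CLAIM (what is proved, stated in full; the proofs are below) =====
def Claim_equal_find_default_element : Prop := ∀ (d : List (Int × Int)), Dom_find_default_element d → Pre_find_default_element d → Spec_find_default_element d (find_default_element d)

-- ===== LEMMAS AND PROOFS =====

-- the run-start test of B, as a predicate on items of the dict nd
def pvStart (nd : PySem.Dict Int Int) (p : Int × Int) : Bool :=
  !(nd.get? (p.1 - 1) == some p.2)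

-- adjacency relation of the sorted item list: "consecutive key with equal value" ↔ "not a run start"
def pvRel (nd : PySem.Dict Int Int) (x y : Int × Int) : Prop :=
  (y.1 = x.1 + 1 ∧ y.2 = x.2) ↔ pvStart nd y = false

theorem pv_foldA (nd : PySem.Dict Int Int) :
    ∀ (l : List (Int × Int)) (p : Int × Int) (c : PySem.Dict Int Int),
      List.IsChain (pvRel nd) (p :: l) →
      (l.foldl pvAstep (some p, c)).2
        = (l.filter (pvStart nd)).foldl (fun c q => c.insert q.2 (c.getD q.2 0 + 1)) c := by
  intro l
  induction l with
  | nil => intro p c _; rfl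
  | cons q t ih =>
    intro p c hch
    rw [List.isChain_cons_cons] at hch
    obtain ⟨hpq, hch'⟩ := hch
    simp only [List.foldl_cons, List.filter_cons]
    cases hs : pvStart nd q with
    | false =>
      have hcons : q.1 = p.1 + 1 ∧ q.2 = p.2 := hpq.mpr hs
      have hstep : pvAstep (some p, c) q = (some q, c) := by
        simp [pvAstep, hcons.1, hcons.2]
      rw [hstep]
      exact ih q c hch'
    | true =>
      have hncons : ¬(q.1 = p.1 + 1 ∧ q.2 = p.2) := by
        intro hc; rw [hpq.mp hc] at hs; exact Bool.false_ne_true hs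
      have hstep : pvAstep (some p, c) q = (some q, c.insert q.2 (c.getD q.2 0 + 1)) := by
        by_cases h1 : q.1 = p.1 + 1
        · have h2 : q.2 ≠ p.2 := fun h2 => hncons ⟨h1, h2⟩
          simp [pvAstep, h1, h2]
        · simp [pvAstep, h1]
      rw [hstep]
      simpa using ih q _ hch'

theorem pv_min2_strict {l : List (Int × Int)} {a : Int × Int} (ha : a ∈ l)
    (h : ∀ y ∈ l, y ≠ a → a.1 < y.1) :
    PySem.List.min2? l (fun p => p.1) (fun p => p.2) = some a := by
  have aux : ∀ (f : Option (Int × Int) → (Int × Int) → Option (Int × Int)),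
      (∀ (m x : Int × Int), f (some m) x =
        if (decide (x.1 < m.1) || !decide (m.1 < x.1) && decide (x.2 < m.2)) = true then some x
        else some m) →
      ∀ (t : List (Int × Int)) (mm : Int × Int), (mm = a ∨ a.1 < mm.1) → (a = mm ∨ a ∈ t) →
      (∀ y ∈ t, y ≠ a → a.1 < y.1) →
      t.foldl f (some mm) = some a := by
    intro f hf t
    induction t with
    | nil =>
      intro mm hm hmem _
      simp only [List.foldl_nil]
      rcases hmem with rfl | h'
      · rfl
      · simp at h'
    | cons x s ih =>
      intro mm hm hmem hall
      simp only [List.foldl_cons, hf]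
      have hall' : ∀ y ∈ s, y ≠ a → a.1 < y.1 :=
        fun y hy hne => hall y (List.mem_cons_of_mem _ hy) hne
      by_cases hxa : x = a
      · by_cases hm_eq : mm = a
        · by_cases hc : (decide (x.1 < mm.1) || !decide (mm.1 < x.1) && decide (x.2 < mm.2)) = true
          · simp only [hc, if_pos]
            exact ih x (Or.inl hxa) (Or.inl hxa.symm) hall'
          · simp only [hc, if_neg, Bool.not_eq_true]
            exact ih mm (Or.inl hm_eq) (Or.inl hm_eq.symm) hall'
        · have hlt : a.1 < mm.1 := hm.resolve_left hm_eq
          have hc : (decide (x.1 < mm.1) || !decide (mm.1 < x.1) && decide (x.2 < mm.2)) = true := by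
            subst hxa; simp; omega
          simp only [hc, if_pos]
          exact ih x (Or.inl hxa) (Or.inl hxa.symm) hall'
      · have hax : a.1 < x.1 := hall x List.mem_cons_self hxa
        by_cases hm_eq : mm = a
        · have hc : (decide (x.1 < mm.1) || !decide (mm.1 < x.1) && decide (x.2 < mm.2)) = false := by
            subst hm_eq; simp; omega
          rw [hc]
          simp only [Bool.false_eq_true, if_neg, not_false_iff]
          exact ih mm (Or.inl hm_eq) (Or.inl hm_eq.symm) hall'
        · have hlt : a.1 < mm.1 := hm.resolve_left hm_eq
          have hmem' : a ∈ s := by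
            rcases hmem with rfl | h'
            · exact absurd rfl hm_eq
            · rcases List.mem_cons.mp h' with rfl | hs
              · exact absurd rfl hxa
              · exact hs
          by_cases hc : (decide (x.1 < mm.1) || !decide (mm.1 < x.1) && decide (x.2 < mm.2)) = true
          · simp only [hc, if_pos]
            exact ih x (Or.inr hax) (Or.inr hmem') hall'
          · simp only [hc, if_neg, Bool.not_eq_true]
            exact ih mm (Or.inr hlt) (Or.inr hmem') hall'
  have hne : l ≠ [] := by rintro rfl; simp at ha
  obtain ⟨x, t, rfl⟩ := List.exists_cons_of_ne_nil hne
  unfold PySem.List.min2?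
  simp only [List.foldl_cons]
  by_cases hxa : x = a
  · exact aux _ (fun m x => rfl) t x (Or.inl hxa) (Or.inl hxa.symm) (fun y hy hne => h y (List.mem_cons_of_mem _ hy) hne)
  · exact aux _ (fun m x => rfl) t x (Or.inr (h x List.mem_cons_self hxa))
      (Or.inr ((List.mem_cons.mp ha).resolve_left (fun e => hxa e.symm)))
      (fun y hy hne => h y (List.mem_cons_of_mem _ hy) hne)

theorem pv_max_id_perm {l1 l2 : List Int} (h : l1.Perm l2) :
    PySem.List.max? l1 (fun c => c) = PySem.List.max? l2 (fun c => c) := by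
  cases h1 : PySem.List.max? l1 (fun c => c) with
  | none =>
    rw [PySem.List.max?_eq_none_iff] at h1
    subst h1
    rw [show l2 = [] from h.symm.eq_nil]; rfl
  | some a =>
    cases h2 : PySem.List.max? l2 (fun c => c) with
    | none =>
      rw [PySem.List.max?_eq_none_iff] at h2
      subst h2
      have := PySem.List.max?_mem h1
      rw [show l1 = [] from h.eq_nil] at this
      simp at this
    | some b =>
      have ha := PySem.List.max?_mem h1
      have hb := PySem.List.max?_mem h2
      have hab : a ≤ b := PySem.List.max?_isMax h2 a (h.mem_iff.mp ha)
      have hba : b ≤ a := PySem.List.max?_isMax h1 b (h.mem_iff.mpr hb)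
      congr 1
      omega

theorem pv_find_discard (q : Int → Bool) (l : List Int) (x : Int) (hx : q x = false) :
    ((PySem.Set.discard l x).find? q) = l.find? q := by
  induction l with
  | nil => rfl
  | cons y t ih =>
    by_cases hyx : y = x
    · subst hyx
      simpa [PySem.Set.discard, List.filter_cons, List.find?_cons, hx] using
        (by simpa [PySem.Set.discard] using ih : List.find? q (List.filter (fun z => !z == y) t) = List.find? q t)
    · have hne : (!(y == x)) = true := by simp [hyx]
      simp only [PySem.Set.discard, List.filter_cons, hne, if_pos, List.find?_cons]
      cases hqy : q y with
      | true => rfl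
      | false => simpa [PySem.Set.discard] using ih

theorem pv_find_ofList (q : Int → Bool) (l : List Int) :
    (PySem.Set.ofList l).find? q = l.find? q := by
  induction l with
  | nil => rfl
  | cons x t ih =>
    rw [PySem.Set.ofList_cons]
    cases hqx : q x with
    | true => simp [hqx]
    | false =>
      simp only [List.find?_cons, hqx]
      rw [pv_find_discard q _ x hqx, ih]

theorem pv_items_ne (d : List (Int × Int)) (hd : d ≠ []) :
    (PySem.Dict.ofList d).items ≠ [] := by
  obtain ⟨x, t, rfl⟩ := List.exists_cons_of_ne_nil hd
  intro h
  have hkeys : (PySem.Dict.ofList (x :: t)).keys = PySem.Set.ofList ((x :: t).map (fun p => p.1)) := by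
    have := PySem.Dict.keys_foldl_insert_key (x :: t) (fun p => p.1) (fun d p => p.2) PySem.Dict.empty
    simpa [PySem.Dict.ofList, PySem.Dict.update, PySem.Set.update_nil_left] using this
  have hx : x.1 ∈ (PySem.Dict.ofList (x :: t)).keys := by
    rw [hkeys]; rw [PySem.Set.mem_ofList]; simp
  rw [show (PySem.Dict.ofList (x :: t)).keys = (PySem.Dict.ofList (x :: t)).items.map (fun p => p.1) from rfl, h] at hx
  simp at hx

theorem pv_master (nd : PySem.Dict Int Int) (hk : nd.keys.Nodup) (hne : nd.items ≠ []) :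
    (((((PySem.List.sorted nd.items (fun p => p.1)).foldl pvAstep (none, PySem.Dict.empty)).2.items.filter
          (fun p => p.2 == (PySem.List.max?
            ((PySem.List.sorted nd.items (fun p => p.1)).foldl pvAstep (none, PySem.Dict.empty)).2.values
            (fun c => c)).getD 0)).map (fun p => p.1)).head?).getD 0
    =
    ((PySem.List.min2?
        ((nd.items.filter (fun p => !(nd.get? (p.1 - 1) == some p.2))).filter
          (fun p => ((nd.items.filter (fun p => !(nd.get? (p.1 - 1) == some p.2))).foldl
              (fun c p => c.insert p.2 (c.getD p.2 0 + 1)) (PySem.Dict.empty : PySem.Dict Int Int)).getD p.2 0 ==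
            (PySem.List.max?
              ((nd.items.filter (fun p => !(nd.get? (p.1 - 1) == some p.2))).foldl
                (fun c p => c.insert p.2 (c.getD p.2 0 + 1)) (PySem.Dict.empty : PySem.Dict Int Int)).values
              (fun c => c)).getD 0))
        (fun p => p.1) (fun p => p.2)).getD (0, 0)).2 := by
  set S := PySem.List.sorted nd.items (fun p => p.1) with hSdef
  -- ---------- structural facts about the sorted item list ----------
  have hpermS : S.Perm nd.items := PySem.List.sorted_perm _ _ _
  have hk' : (nd.items.map (fun p : Int × Int => p.1)).Nodup := by simpa [PySem.Dict.keys] using hk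
  have hkeysS : (S.map (fun p => p.1)).Nodup := (hpermS.map (fun p => p.1)).nodup_iff.mpr hk'
  have hpair : S.Pairwise (fun a b => a.1 < b.1) := by
    have h1 : S.Pairwise (fun a b => a.1 ≤ b.1) := PySem.List.sorted_pairwise nd.items (fun p => p.1)
    have h2 : S.Pairwise (fun a b => a.1 ≠ b.1) := List.pairwise_map.mp hkeysS
    exact (h1.and h2).imp (fun h => lt_of_le_of_ne h.1 h.2)
  have hmemS : ∀ p : Int × Int, p ∈ S ↔ nd.get? p.1 = some p.2 := by
    intro p
    rw [hSdef, PySem.List.mem_sorted]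
    cases p with
    | mk k v => exact (PySem.Dict.get?_eq_some_iff_mem_items nd k v hk).symm
  have hmono := List.pairwise_iff_getElem.mp hpair
  have hchain : List.IsChain (pvRel nd) S := by
    rw [List.isChain_iff_getElem]
    intro i hi
    have hi1 : i < S.length := by omega
    constructor
    · rintro ⟨h1, h2⟩
      have hm : nd.get? (S[i].1) = some (S[i].2) := (hmemS _).mp (List.getElem_mem _)
      have hg : nd.get? (S[i+1].1 - 1) = some (S[i+1].2) := by
        rw [show S[i+1].1 - 1 = S[i].1 by omega, h2]; exact hm
      simp [pvStart, hg]
    · intro hs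
      have hget : nd.get? (S[i+1].1 - 1) = some (S[i+1].2) := by
        simpa [pvStart] using hs
      have hz : (S[i+1].1 - 1, S[i+1].2) ∈ S := (hmemS _).mpr hget
      obtain ⟨j, hj, hje⟩ := List.mem_iff_getElem.mp hz
      have hji : j = i := by
        have hkey : S[j].1 = S[i+1].1 - 1 := congrArg Prod.fst hje
        have hii : S[i].1 < S[i+1].1 := hmono i (i+1) hi1 hi (by omega)
        by_contra hne'
        rcases lt_or_gt_of_ne hne' with hlt | hgt
        · have := hmono j i hj hi1 hlt; omega
        · rcases Nat.lt_or_ge j (i+1) with h' | h'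
          · omega
          · rcases Nat.eq_or_lt_of_le h' with h'' | h''
            · subst h''; omega
            · have := hmono (i+1) j hi hj h''; omega
      subst hji
      refine ⟨by have := congrArg Prod.fst hje; simp at this; omega, ?_⟩
      have := congrArg Prod.snd hje; simp at this; omega
  -- S is nonempty
  have hSne : S ≠ [] := by
    intro h
    rw [h] at hpermS
    exact hne hpermS.symm.eq_nil
  obtain ⟨hd, T, hST⟩ := List.exists_cons_of_ne_nil hSne
  have hheadstart : pvStart nd hd = true := by
    by_contra hs
    have hs' : pvStart nd hd = false := by simpa using hs
    have hget : nd.get? (hd.1 - 1) = some hd.2 := by simpa [pvStart] using hs'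
    have hz : (hd.1 - 1, hd.2) ∈ S := (hmemS _).mpr hget
    rw [hST] at hz
    rcases List.mem_cons.mp hz with he | hzT
    · have : hd.1 - 1 = hd.1 := congrArg Prod.fst he
      omega
    · have := (List.pairwise_cons.mp (hST ▸ hpair)).1 _ hzT
      simp at this
      omega
  -- ---------- both loops as counters over the run starts ----------
  have hR : S.filter (pvStart nd) = hd :: T.filter (pvStart nd) := by
    rw [hST, List.filter_cons, hheadstart]; simp
  have hAfold : ((S.foldl pvAstep (none, PySem.Dict.empty)).2)
      = PySem.Dict.counter ((S.filter (pvStart nd)).map (fun p => p.2)) := by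
    rw [← PySem.Dict.foldl_insert_getD_add_one_eq_counter, List.foldl_map, hR, hST]
    rw [List.foldl_cons, List.foldl_cons]
    exact pv_foldA nd T hd _ (hST ▸ hchain)
  have hstarts : nd.items.filter (fun p => !(nd.get? (p.1 - 1) == some p.2))
      = nd.items.filter (pvStart nd) := rfl
  have hBfold : ((nd.items.filter (pvStart nd)).foldl
        (fun c p => c.insert p.2 (c.getD p.2 0 + 1)) (PySem.Dict.empty : PySem.Dict Int Int))
      = PySem.Dict.counter ((nd.items.filter (pvStart nd)).map (fun p => p.2)) := by
    rw [← PySem.Dict.foldl_insert_getD_add_one_eq_counter, List.foldl_map]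
  -- ---------- permutation facts and the shared maximum ----------
  set R := S.filter (pvStart nd) with hRdef
  set starts := nd.items.filter (pvStart nd) with hstartsdef
  set vals := R.map (fun p => p.2) with hvalsdef
  set vals' := starts.map (fun p => p.2) with hvals'def
  have hRperm : R.Perm starts := hpermS.filter _
  have hvalsperm : vals.Perm vals' := hRperm.map _
  have hcount : ∀ v : Int, vals'.count v = vals.count v := fun v => (hvalsperm.count_eq v).symm
  have hvaluesA : (PySem.Dict.counter vals).values
      = (PySem.Set.ofList vals).map (fun v => ((vals.count v : Int))) := by
    rw [PySem.Dict.values_eq_map_keys _ (PySem.Dict.nodup_keys_counter vals) 0,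
      PySem.Dict.keys_counter]
    exact List.map_congr_left (fun v _ => PySem.Dict.getD_counter vals v)
  have hvaluesB : (PySem.Dict.counter vals').values
      = (PySem.Set.ofList vals').map (fun v => ((vals'.count v : Int))) := by
    rw [PySem.Dict.values_eq_map_keys _ (PySem.Dict.nodup_keys_counter vals') 0,
      PySem.Dict.keys_counter]
    exact List.map_congr_left (fun v _ => PySem.Dict.getD_counter vals' v)
  have hsetperm : (PySem.Set.ofList vals).Perm (PySem.Set.ofList vals') :=
    (List.perm_ext_iff_of_nodup (PySem.Set.nodup_ofList _) (PySem.Set.nodup_ofList _)).mpr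
      (fun v => by rw [PySem.Set.mem_ofList, PySem.Set.mem_ofList]; exact hvalsperm.mem_iff)
  have hvaluesperm : (PySem.Dict.counter vals).values.Perm (PySem.Dict.counter vals').values := by
    rw [hvaluesA, hvaluesB]
    have h1 := hsetperm.map (fun v => ((vals.count v : Int)))
    have h2 : (PySem.Set.ofList vals').map (fun v => ((vals.count v : Int)))
        = (PySem.Set.ofList vals').map (fun v => ((vals'.count v : Int))) :=
      List.map_congr_left (fun v _ => by rw [hcount v])
    exact h2 ▸ h1
  have hmaxeq : PySem.List.max? (PySem.Dict.counter vals').values (fun c => c)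
      = PySem.List.max? (PySem.Dict.counter vals).values (fun c => c) :=
    (pv_max_id_perm hvaluesperm).symm
  -- ---------- the maximum exists and is attained ----------
  have hvalsne : vals ≠ [] := by rw [hvalsdef, hR]; simp
  have hhdval : hd.2 ∈ PySem.Set.ofList vals := by
    rw [PySem.Set.mem_ofList, hvalsdef, hR]; simp
  have hvaluesne : (PySem.Dict.counter vals).values ≠ [] := by
    rw [hvaluesA]
    intro h
    rw [List.map_eq_nil_iff] at h
    rw [h] at hhdval
    simp at hhdval
  obtain ⟨mval, hmval⟩ : ∃ mval, PySem.List.max? (PySem.Dict.counter vals).values (fun c => c) = some mval := by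
    cases hmx : PySem.List.max? (PySem.Dict.counter vals).values (fun c => c) with
    | none => exact absurd ((PySem.List.max?_eq_none_iff _ _).mp hmx) hvaluesne
    | some m => exact ⟨m, rfl⟩
  obtain ⟨vstar, hvstar_mem, hvstar_cnt⟩ :
      ∃ v, v ∈ PySem.Set.ofList vals ∧ ((vals.count v : Int)) = mval := by
    have := PySem.List.max?_mem hmval
    rw [hvaluesA] at this
    obtain ⟨v, hv, he⟩ := List.mem_map.mp this
    exact ⟨v, hv, he⟩
  -- ---------- the common selected element c0 ----------
  have hvstar_vals : vstar ∈ vals := (PySem.Set.mem_ofList _ _).mp hvstar_mem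
  obtain ⟨p0, hp0R, hp0v⟩ := List.mem_map.mp hvstar_vals
  obtain ⟨c0, hfind⟩ : ∃ c0, R.find? (fun p => ((vals.count p.2 : Int) == mval)) = some c0 := by
    cases hf : R.find? (fun p => ((vals.count p.2 : Int) == mval)) with
    | none =>
      exfalso
      have := List.find?_eq_none.mp hf p0 hp0R
      rw [hp0v, hvstar_cnt] at this
      simp at this
    | some c0 => exact ⟨c0, rfl⟩
  have hc0R : c0 ∈ R := List.mem_of_find?_eq_some hfind
  -- ---------- the A side equals c0.2 ----------
  have hAside : (((((PySem.Dict.counter vals).items.filter (fun p => p.2 == mval)).map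
      (fun p => p.1)).head?).getD 0) = c0.2 := by
    rw [PySem.Dict.items_counter, List.filter_map, List.map_map,
      show ((fun p : Int × Int => p.2 == mval) ∘ fun k => (k, (vals.count k : Int)))
        = (fun v : Int => ((vals.count v : Int) == mval)) from rfl,
      show ((fun p : Int × Int => p.1) ∘ fun k => (k, (vals.count k : Int))) = (fun v : Int => v) from rfl,
      List.map_id', List.head?_filter, pv_find_ofList, hvalsdef, List.find?_map,
      show ((fun v : Int => ((vals.count v : Int) == mval)) ∘ fun p : Int × Int => p.2)
        = (fun p : Int × Int => ((vals.count p.2 : Int) == mval)) from rfl]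
    rw [hfind]
    rfl
  -- ---------- the B side equals c0.2 ----------
  have hpredcongr : starts.filter (fun p => ((PySem.Dict.counter vals').getD p.2 0 == mval))
      = starts.filter (fun p => ((vals.count p.2 : Int) == mval)) :=
    List.filter_congr (fun p _ => by rw [PySem.Dict.getD_counter, hcount])
  have hheadc : (R.filter (fun p => ((vals.count p.2 : Int) == mval))).head? = some c0 := by
    rw [List.head?_filter]; exact hfind
  obtain ⟨rest, hrest⟩ : ∃ rest, R.filter (fun p => ((vals.count p.2 : Int) == mval)) = c0 :: rest := by
    cases h : R.filter (fun p => ((vals.count p.2 : Int) == mval)) with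
    | nil => rw [h] at hheadc; simp at hheadc
    | cons a t =>
      rw [h] at hheadc
      simp at hheadc
      exact ⟨t, by rw [hheadc]⟩
  have hpaircand : (R.filter (fun p => ((vals.count p.2 : Int) == mval))).Pairwise
      (fun a b => a.1 < b.1) := (hpair.filter _).filter _
  have hc0cand : c0 ∈ starts.filter (fun p => ((vals.count p.2 : Int) == mval)) :=
    (hRperm.filter _).mem_iff.mp (hrest ▸ List.mem_cons_self)
  have hmin : ∀ y ∈ starts.filter (fun p => ((vals.count p.2 : Int) == mval)), y ≠ c0 → c0.1 < y.1 := by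
    intro y hy hyne
    have hyR : y ∈ R.filter (fun p => ((vals.count p.2 : Int) == mval)) :=
      (hRperm.filter _).mem_iff.mpr hy
    rw [hrest] at hyR
    rcases List.mem_cons.mp hyR with rfl | hyrest
    · exact absurd rfl hyne
    · exact (List.pairwise_cons.mp (hrest ▸ hpaircand)).1 y hyrest
  have hBmin := pv_min2_strict hc0cand hmin
  -- ---------- assemble ----------
  rw [hstarts]
  simp only [hAfold, hBfold]

  rw [hmaxeq, hmval]
  simp only [Option.getD_some]
  rw [hpredcongr, hBmin, hAside]
  rfl

-- ===== VERDICT (by name: the statement is the Claim_ definition above) =====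
theorem find_default_element_spec : Claim_equal_find_default_element := by
  intro d _ hpre
  unfold Spec_find_default_element find_default_element find_default_element_alt
  exact pv_master (PySem.Dict.ofList d) (PySem.Dict.nodup_keys_ofList d) (pv_items_ne d hpre)
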